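-- pv_equiv track=rewrite | github.com/Teddy12S/CSEC_CPD | Sereja and Dima.py | game_score
-- ===== SOURCE A (Python) =====
-- def game_score(n, cards):
--     sereja_score = 0
--     dima_score = 0
--     left, right = 0, n - 1
--     turn = 0  # 0 for Sereja, 1 for Dima
--
--     while left <= right:
--         if cards[left] > cards[right]:
--             chosen_card = cards[left]
--             left += 1
--         else:
--             chosen_card = cards[right]
--             right -= 1
--
--         if turn == 0:  # Sereja's turn
--             sereja_score += chosen_card
--         else:  # Dima's turn
--             dima_score += chosen_card
--
--         turn = 1 - turn  # Switch turns
--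
--     return sereja_score, dima_score
-- ===== SOURCE B (Python) =====
-- def game_score(n, cards):
--     # Build the sequence of chosen cards first, then split it by pick parity.
--     picks = []
--     lo, hi = 0, n - 1
--     for _ in range(n):
--         if cards[lo] > cards[hi]:
--             picks.append(cards[lo])
--             lo += 1
--         else:
--             picks.append(cards[hi])
--             hi -= 1
--     return sum(picks[0::2]), sum(picks[1::2])
-- ===== Notes on version B (the rewrite author's own statement) =====
-- stated objective: alternative
-- what changed: A interleaves the two-pointer pick loop with a toggled turn flag and two running scores; B first builds the full list of picked cards (a bounded for-loop over range(n)) and then partitions it by pick parity with picks[0::2]/picks[1::2] sums.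
import Mathlib
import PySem

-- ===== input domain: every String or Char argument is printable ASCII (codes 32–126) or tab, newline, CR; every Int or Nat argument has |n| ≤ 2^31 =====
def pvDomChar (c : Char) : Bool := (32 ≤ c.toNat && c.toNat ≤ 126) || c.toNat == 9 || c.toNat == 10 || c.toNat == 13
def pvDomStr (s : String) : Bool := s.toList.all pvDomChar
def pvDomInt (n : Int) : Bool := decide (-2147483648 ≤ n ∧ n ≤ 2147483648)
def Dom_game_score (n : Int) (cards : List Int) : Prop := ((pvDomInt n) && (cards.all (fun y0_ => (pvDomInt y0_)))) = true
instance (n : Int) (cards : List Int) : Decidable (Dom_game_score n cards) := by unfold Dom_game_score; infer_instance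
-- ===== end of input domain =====

-- B keeps the tie-breaking two-pointer pick order but replaces A's turn flag and two
-- running scores with a build-then-partition decomposition: collect the picked cards,
-- then sum the even-/odd-indexed picks (picks[0::2], picks[1::2]).

-- ===== PORT A =====
-- while left <= right: take the larger end (ties -> right), credit the player on turn.
-- Fuel n.toNat is exact: the window [left,right] starts with n cells and shrinks by
-- one per iteration, so the while loop performs exactly max(n,0) iterations.
def gameLoopA (cards : List Int) : Nat → Int → Int → Int → Int → Int → Int × Int
  | 0, _, _, _, s, d => (s, d)
  | f + 1, left, right, turn, s, d =>
    if left ≤ right then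
      let cl := PySem.List.pyGetD cards left 0
      let cr := PySem.List.pyGetD cards right 0
      let chosen := if cl > cr then cl else cr
      let left' := if cl > cr then left + 1 else left
      let right' := if cl > cr then right else right - 1
      if turn = 0 then
        gameLoopA cards f left' right' (1 - turn) (s + chosen) d
      else
        gameLoopA cards f left' right' (1 - turn) s (d + chosen)
    else (s, d)

def game_score (n : Int) (cards : List Int) : Int × Int :=
  gameLoopA cards n.toNat 0 (n - 1) 0 0 0

-- ===== PORT B =====
-- one iteration of B's for-loop body: append the larger end to picks, move that pointer
def stepB (cards : List Int) (st : List Int × Int × Int) (_ : Int) : List Int × Int × Int :=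
  if PySem.List.pyGetD cards st.2.1 0 > PySem.List.pyGetD cards st.2.2 0 then
    (st.1 ++ [PySem.List.pyGetD cards st.2.1 0], st.2.1 + 1, st.2.2)
  else
    (st.1 ++ [PySem.List.pyGetD cards st.2.2 0], st.2.1, st.2.2 - 1)

-- picks = []; lo, hi = 0, n - 1; for _ in range(n): ...
def picksB (n : Int) (cards : List Int) : List Int × Int × Int :=
  (PySem.List.pyRange 0 n 1).foldl (stepB cards) ([], 0, n - 1)

-- return sum(picks[0::2]), sum(picks[1::2])
def game_score_alt (n : Int) (cards : List Int) : Int × Int :=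
  (((PySem.List.slice? (picksB n cards).1 (some 0) none 2).getD []).sum,
   ((PySem.List.slice? (picksB n cards).1 (some 1) none 2).getD []).sum)

-- ===== PRECONDITION & SPEC =====
-- Pre_ excludes exactly the inputs where both Pythons raise IndexError:
-- 1 <= n but n > len(cards) (the loop reads cards[n-1]).
def Pre_game_score (n : Int) (cards : List Int) : Prop :=
  n ≤ (cards.length : Int) ∨ n ≤ 0
instance (n : Int) (cards : List Int) : Decidable (Pre_game_score n cards) := by
  unfold Pre_game_score; infer_instance

def pvWitness_game_score : Int × List Int := (4, [4, 1, 2, 10])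

def Spec_game_score (n : Int) (cards : List Int) (out : Int × Int) : Prop := out = game_score_alt n cards
instance (n : Int) (cards : List Int) (out : Int × Int) : Decidable (Spec_game_score n cards out) := by unfold Spec_game_score; infer_instance

-- ===== CLAIM (what is proved, stated in full; the proofs are below) =====
def Claim_equal_game_score : Prop := ∀ (n : Int) (cards : List Int), Dom_game_score n cards → Pre_game_score n cards → Spec_game_score n cards (game_score n cards)

-- ===== LEMMAS AND PROOFS =====

-- the sequence of chosen cards; both loops are shown to realise it
def pickRun (cards : List Int) : Nat → Int → Int → List Int
  | 0, _, _ => []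
  | f + 1, l, r =>
    if PySem.List.pyGetD cards l 0 > PySem.List.pyGetD cards r 0 then
      PySem.List.pyGetD cards l 0 :: pickRun cards f (l + 1) r
    else
      PySem.List.pyGetD cards r 0 :: pickRun cards f l (r - 1)

-- (sum of even-indexed elements, sum of odd-indexed elements)
def altSum : List Int → Int × Int
  | [] => (0, 0)
  | x :: xs => (x + (altSum xs).2, (altSum xs).1)

-- even-indexed elements, two-step recursion
def evens : List Int → List Int
  | [] => []
  | [x] => [x]
  | x :: _ :: t => x :: evens t

lemma gameLoopA_eq_altSum (cards : List Int) :
    ∀ (f : Nat) (l r s d : Int), (f : Int) = r - l + 1 →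
      gameLoopA cards f l r 0 s d
        = (s + (altSum (pickRun cards f l r)).1, d + (altSum (pickRun cards f l r)).2) ∧
      gameLoopA cards f l r 1 s d
        = (s + (altSum (pickRun cards f l r)).2, d + (altSum (pickRun cards f l r)).1) := by
  intro f
  induction f with
  | zero => intro l r s d _; simp [gameLoopA, pickRun, altSum]
  | succ f ih =>
    intro l r s d hf
    have hlr : l ≤ r := by omega
    by_cases hc : PySem.List.pyGetD cards l 0 > PySem.List.pyGetD cards r 0
    · have h1 := (ih (l + 1) r (s + PySem.List.pyGetD cards l 0) d (by omega)).2
      have h2 := (ih (l + 1) r s (d + PySem.List.pyGetD cards l 0) (by omega)).1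
      constructor
      · simp only [gameLoopA, if_pos hlr, hc, if_pos, sub_zero]
        rw [h1]
        simp [pickRun, hc, altSum]
        all_goals omega
      · simp only [gameLoopA, if_pos hlr, hc, if_pos, sub_self,
          if_neg (by norm_num : (1 : Int) ≠ 0)]
        rw [h2]
        simp [pickRun, hc, altSum]
        all_goals omega
    · have h1 := (ih l (r - 1) (s + PySem.List.pyGetD cards r 0) d (by omega)).2
      have h2 := (ih l (r - 1) s (d + PySem.List.pyGetD cards r 0) (by omega)).1
      constructor
      · simp only [gameLoopA, if_pos hlr, hc, if_false, sub_zero]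
        rw [h1]
        simp [pickRun, hc, altSum]
        all_goals omega
      · simp only [gameLoopA, if_pos hlr, hc, if_false, sub_self,
          if_neg (by norm_num : (1 : Int) ≠ 0)]
        rw [h2]
        simp [pickRun, hc, altSum]
        all_goals omega

lemma foldl_stepB_eq_pickRun (cards : List Int) :
    ∀ (idxs : List Int) (acc : List Int) (l r : Int),
      (idxs.foldl (stepB cards) (acc, l, r)).1 = acc ++ pickRun cards idxs.length l r := by
  intro idxs
  induction idxs with
  | nil => intro acc l r; simp [pickRun]
  | cons i t ih =>
    intro acc l r
    by_cases hc : PySem.List.pyGetD cards l 0 > PySem.List.pyGetD cards r 0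
    · simp only [List.foldl_cons, stepB, hc, if_pos, List.length_cons]
      rw [ih]
      simp [pickRun, hc]
    · simp only [List.foldl_cons, stepB, hc, if_false, List.length_cons]
      rw [ih]
      simp [pickRun, hc]

lemma picksB_eq_pickRun (n : Int) (cards : List Int) :
    (picksB n cards).1 = pickRun cards n.toNat 0 (n - 1) := by
  unfold picksB
  rw [foldl_stepB_eq_pickRun]
  simp [PySem.List.length_pyRange_one]

lemma evens_eq_slice (p : List Int) :
    PySem.List.slice? p (some 0) none 2 = some (evens p) := by
  induction p using evens.induct with
  | case1 => decide
  | case2 x =>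
    simp [PySem.List.slice?, PySem.List.sliceIndices, evens, List.range_succ]
  | case3 x y t ih =>
    simp [PySem.List.slice?, PySem.List.sliceIndices, evens] at ih ⊢
    have hmin : min (0:Int) ((t.length:Int) + 1 + 1) = 0 := by omega
    simp only [hmin]
    rw [if_pos (show (0:Int) ≤ (t.length:Int) + 1 by positivity)]
    have hcount : (((t.length:Int) + 1 + 1 - 0 + 2 - 1) / 2).toNat
        = (if 0 < t.length then (((t.length:Int) + 2 - 1) / 2).toNat else 0) + 1 := by
      split_ifs <;> omega
    rw [hcount, List.range_succ_eq_map, List.filterMap_cons, List.filterMap_map]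
    norm_num
    rw [← ih]
    apply List.filterMap_congr
    intro k hk
    have hidx : ((2:Int) * ((k:Int) + 1)).toNat = (2 * (k:Int)).toNat + 1 + 1 := by omega
    rw [hidx, List.getElem?_cons_succ, List.getElem?_cons_succ]

lemma slice_one_cons (x : Int) (p : List Int) :
    PySem.List.slice? (x :: p) (some 1) none 2 = PySem.List.slice? p (some 0) none 2 := by
  simp [PySem.List.slice?, PySem.List.sliceIndices]
  apply List.filterMap_congr
  intro k hk
  have h : ((1:Int) + 2 * (k:Int)).toNat = (2 * (k:Int)).toNat + 1 := by omega
  rw [h, List.getElem?_cons_succ]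

lemma odds_eq_slice (p : List Int) :
    PySem.List.slice? p (some 1) none 2 = some (evens p.tail) := by
  cases p with
  | nil => decide
  | cons x t => rw [slice_one_cons, evens_eq_slice]; rfl

lemma evens_sum (p : List Int) : (evens p).sum = (altSum p).1 := by
  induction p using evens.induct with
  | case1 => simp [evens, altSum]
  | case2 x => simp [evens, altSum]
  | case3 x y t ih => simp [evens, altSum, ih]

lemma altSum_snd_tail (p : List Int) : (altSum p).2 = (altSum p.tail).1 := by
  cases p with
  | nil => simp [altSum]
  | cons x t => simp [altSum]

-- ===== VERDICT (by name: the statement is the Claim_ definition above) =====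
theorem game_score_spec : Claim_equal_game_score := by
  intro n cards _ _
  unfold Spec_game_score game_score game_score_alt
  rw [picksB_eq_pickRun, evens_eq_slice, odds_eq_slice]
  simp only [Option.getD_some]
  by_cases hn : n ≤ 0
  · have h0 : n.toNat = 0 := by omega
    rw [h0]
    simp [gameLoopA, pickRun, evens]
  · have h := (gameLoopA_eq_altSum cards n.toNat 0 (n - 1) 0 0 (by omega)).1
    rw [h, evens_sum, altSum_snd_tail, evens_sum]
    simp
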